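-- pv_equiv track=rewrite | github.com/czgbjy/ArtificialEllipsoidBridge | ReturnToOriginNeuralNetwork.py | max_activate_inhibit
-- ===== SOURCE A (Python) =====
-- def max_activate_inhibit(arr):
--     """Inhibit non-maximum continuous activation segments."""
--     if not arr or len(arr) == 0:
--         return []
--
--     max_count = 0  # Length of longest continuous 1s
--     max_start = -1  # Start index of longest continuous 1s
--     current_count = 0  # Current continuous 1s count
--     current_start = -1  # Current start index
--
--     # Find the longest continuous segment of 1s
--     for i in range(len(arr)):
--         if arr[i] == 1:
--             if current_count == 0:
--                 current_start = i
--             current_count += 1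
--             if current_count > max_count:
--                 max_count = current_count
--                 max_start = current_start
--         else:
--             current_count = 0
--             current_start = -1
--
--     # Set all 1s outside the longest segment to 0
--     for i in range(len(arr)):
--         if arr[i] == 1 and (i < max_start or i >= max_start + max_count):
--             arr[i] = 0
--     return arr
-- ===== SOURCE B (Python) =====
-- def max_activate_inhibit(arr):
--     """Inhibit non-maximum continuous activation segments.
--
--     B: build an explicit table of maximal 1-runs as (start, length) pairs,
--     pick the first longest run, then zero every 1 outside its window.
--     Mutates arr in place (like A) and returns it."""
--     runs = []
--     n = len(arr)
--     i = 0
--     while i < n: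
--         if arr[i] == 1:
--             j = i + 1
--             while j < n and arr[j] == 1:
--                 j += 1
--             runs.append((i, j - i))
--             i = j
--         else:
--             i += 1
--     if runs:
--         best = runs[0]
--         for r in runs[1:]:
--             if r[1] > best[1]:
--                 best = r
--         start, length = best
--         for k in range(n):
--             if arr[k] == 1 and not (start <= k < start + length):
--                 arr[k] = 0
--     return arr
-- ===== Notes on version B (the rewrite author's own statement) =====
-- stated objective: alternative
-- what changed: B first materialises all maximal 1-runs as an explicit (start, length) table, then selects the first longest run and zeroes 1s outside it, instead of A's single incremental max-tracking scan with four state variables.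
import Mathlib
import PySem

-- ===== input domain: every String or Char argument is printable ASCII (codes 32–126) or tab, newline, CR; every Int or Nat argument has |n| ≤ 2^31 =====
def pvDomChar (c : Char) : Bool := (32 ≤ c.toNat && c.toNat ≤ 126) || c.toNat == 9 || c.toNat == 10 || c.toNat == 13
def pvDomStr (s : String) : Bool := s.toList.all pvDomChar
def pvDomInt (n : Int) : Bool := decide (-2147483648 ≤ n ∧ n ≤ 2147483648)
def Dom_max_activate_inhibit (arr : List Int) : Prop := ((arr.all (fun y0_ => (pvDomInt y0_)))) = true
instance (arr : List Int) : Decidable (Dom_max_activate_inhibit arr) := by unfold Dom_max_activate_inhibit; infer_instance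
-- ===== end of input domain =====

-- B replaces A's incremental four-variable max-tracking scan by an explicit table of
-- maximal 1-runs, first-longest selection over that table, then zeroing outside the window
-- (objective: alternative decomposition, same cost). Equivalence is about the return
-- value; both Pythons mutate arr in place identically.

-- ===== PORT A =====
-- loop state: (max_count, max_start, current_count, current_start), all Python ints
def maiStep (st : Int × Int × Int × Int) (p : Int × Nat) : Int × Int × Int × Int :=
  let (mc, ms, cc, cs) := st
  if p.1 = 1 then
    let cs' := if cc = 0 then (p.2 : Int) else cs
    let cc' := cc + 1
    if cc' > mc then (cc', cs', cc', cs') else (mc, ms, cc', cs')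
  else (mc, ms, 0, -1)

def max_activate_inhibit (arr : List Int) : List Int :=
  if arr = [] then []
  else
    let st := List.foldl maiStep (0, -1, 0, -1) arr.zipIdx
    arr.zipIdx.map (fun p =>
      if p.1 = 1 ∧ ((p.2 : Int) < st.2.1 ∨ (p.2 : Int) ≥ st.2.1 + st.1) then 0 else p.1)

-- ===== PORT B =====
-- length of the leading block of 1s
def countLead : List Int → Nat
  | [] => 0
  | x :: xs => if x = 1 then countLead xs + 1 else 0

-- the maximal 1-runs of the list as (start, length) pairs
def runsOf : List Int → Nat → List (Nat × Nat)
  | [], _ => []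
  | x :: xs, i =>
    if x = 1 then
      let k := countLead xs
      (i, k + 1) :: runsOf (xs.drop k) (i + k + 1)
    else runsOf xs (i + 1)
  termination_by l => l.length
  decreasing_by
    · simp
    · simp

def max_activate_inhibit_alt (arr : List Int) : List Int :=
  match runsOf arr 0 with
  | [] => arr
  | r :: rs =>
    let best := rs.foldl (fun b q => if q.2 > b.2 then q else b) r
    arr.zipIdx.map (fun p =>
      if p.1 = 1 ∧ ¬(best.1 ≤ p.2 ∧ p.2 < best.1 + best.2) then 0 else p.1)

-- ===== PRECONDITION & SPEC =====
def Spec_max_activate_inhibit (arr : List Int) (out : List Int) : Prop := out = max_activate_inhibit_alt arr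
instance (arr : List Int) (out : List Int) : Decidable (Spec_max_activate_inhibit arr out) := by unfold Spec_max_activate_inhibit; infer_instance

-- ===== CLAIM (what is proved, stated in full; the proofs are below) =====
def Claim_equal_max_activate_inhibit : Prop := ∀ (arr : List Int), Dom_max_activate_inhibit arr → Spec_max_activate_inhibit arr (max_activate_inhibit arr)

-- ===== LEMMAS AND PROOFS =====

-- "take the max" update on A's (max_count, max_start) by a run (start, length)
def maxUpd (m : Int × Int) (r : Nat × Nat) : Int × Int :=
  if (r.2 : Int) > m.1 then ((r.2 : Int), (r.1 : Int)) else m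

-- the rest of a list after its leading 1-run does not start with a 1
theorem head_drop_countLead (xs : List Int) : (xs.drop (countLead xs)).head? ≠ some 1 := by
  induction xs with
  | nil => simp
  | cons x xs ih =>
    by_cases hx : x = 1
    · simp only [countLead, hx, if_pos]
      simpa using ih
    · simp [countLead, hx]

-- scanning the leading 1-run from a mid-run state (cc ≥ 1, current start s)
theorem runScan (xs : List Int) : ∀ (i : Nat) (mc ms cc s : Int),
    1 ≤ cc → cc ≤ mc →
    List.foldl maiStep (mc, ms, cc, s) (xs.zipIdx i)
      = List.foldl maiStep
          (if cc + (countLead xs : Int) > mc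
            then (cc + (countLead xs : Int), s, cc + (countLead xs : Int), s)
            else (mc, ms, cc + (countLead xs : Int), s))
          ((xs.drop (countLead xs)).zipIdx (i + countLead xs)) := by
  induction xs with
  | nil =>
    intro i mc ms cc s h1 h2
    simp only [countLead, Nat.cast_zero, add_zero, List.drop_nil, List.zipIdx_nil,
      List.foldl_nil]
    rw [if_neg (by omega)]
  | cons x xs ih =>
    intro i mc ms cc s h1 h2
    by_cases hx : x = 1
    · have hclN : countLead (x :: xs) = countLead xs + 1 := by simp [countLead, hx]
      have hcl : (countLead (x :: xs) : Int) = (countLead xs : Int) + 1 := by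
        rw [hclN]; push_cast; ring
      have hdrop : (x :: xs).drop (countLead (x :: xs)) = xs.drop (countLead xs) := by
        rw [hclN]; simp
      have hidx : i + countLead (x :: xs) = (i + 1) + countLead xs := by rw [hclN]; omega
      have hcc : ¬ cc = 0 := by omega
      rw [List.zipIdx_cons, List.foldl_cons, hdrop, hidx, hcl,
        show maiStep (mc, ms, cc, s) (x, i)
          = (if cc + 1 > mc then (cc + 1, s, cc + 1, s) else (mc, ms, cc + 1, s)) by
          simp [maiStep, hx, hcc]]
      by_cases hup : cc + 1 > mc
      · rw [if_pos hup, ih (i + 1) (cc + 1) s (cc + 1) s (by omega) (by omega)]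
        congr 1
        split_ifs <;> simp [Prod.ext_iff] <;> omega
      · rw [if_neg hup, ih (i + 1) mc ms (cc + 1) s (by omega) (by omega),
          show cc + 1 + (countLead xs : Int) = cc + ((countLead xs : Int) + 1) by omega]
    · have hclN : countLead (x :: xs) = 0 := by simp [countLead, hx]
      rw [hclN]
      simp only [Nat.cast_zero, add_zero, List.drop_zero]
      rw [if_neg (by omega)]

-- A's scan, started in a clean current-run state, computes the maxUpd fold over the run table
theorem mainScan (n : Nat) : ∀ (l : List Int), l.length ≤ n → ∀ (i : Nat) (mc ms cc cs : Int),
    0 ≤ cc → cc ≤ mc → (l.head? = some 1 → cc = 0) →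
    ((List.foldl maiStep (mc, ms, cc, cs) (l.zipIdx i)).1,
     (List.foldl maiStep (mc, ms, cc, cs) (l.zipIdx i)).2.1)
      = List.foldl maxUpd (mc, ms) (runsOf l i) := by
  induction n with
  | zero =>
    intro l hl
    rw [List.length_eq_zero_iff.mp (Nat.le_zero.mp hl)]
    intro i mc ms cc cs _ _ _
    simp [runsOf]
  | succ n ih =>
    intro l hl i mc ms cc cs h0 h2 hclean
    match l with
    | [] => simp [runsOf]
    | x :: xs =>
      by_cases hx : x = 1
      · have hcc : cc = 0 := hclean (by simp [hx])
        subst hcc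
        have hstep : maiStep (mc, ms, 0, cs) (x, i)
            = (if (1:Int) > mc then ((1:Int), (i:Int), (1:Int), (i:Int))
               else (mc, ms, 1, (i:Int))) := by
          simp only [maiStep, hx]; split <;> simp_all
        set k := countLead xs with hk
        have hrun : ∀ (mc' ms' : Int), 1 ≤ mc' →
            List.foldl maiStep (mc', ms', 1, (i:Int)) (xs.zipIdx (i+1))
              = List.foldl maiStep
                  (if 1 + (k : Int) > mc'
                    then (1 + (k : Int), (i:Int), 1 + (k : Int), (i:Int))
                    else (mc', ms', 1 + (k : Int), (i:Int)))
                  ((xs.drop k).zipIdx (i + 1 + k)) := by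
          intro mc' ms' h
          simpa [← hk] using runScan xs (i+1) mc' ms' 1 (i:Int) (by omega) h
        have hrest : ∀ (a b : Int), 1 + (k:Int) ≤ a →
            ((List.foldl maiStep (a, b, 1 + (k:Int), (i:Int)) ((xs.drop k).zipIdx (i + 1 + k))).1,
             (List.foldl maiStep (a, b, 1 + (k:Int), (i:Int)) ((xs.drop k).zipIdx (i + 1 + k))).2.1)
              = List.foldl maxUpd (a, b) (runsOf (xs.drop k) (i + 1 + k)) := by
          intro a b ha
          apply ih (xs.drop k) (by simp at hl ⊢; omega) (i + 1 + k) a b (1 + (k:Int)) (i:Int)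
            (by omega) ha
          intro hh
          exact absurd hh (by simpa [← hk] using head_drop_countLead xs)
        have hruns : runsOf (x :: xs) i = (i, k + 1) :: runsOf (xs.drop k) (i + 1 + k) := by
          rw [runsOf, if_pos hx]
          show (i, k + 1) :: runsOf (List.drop k xs) (i + k + 1) = _
          rw [show i + k + 1 = i + 1 + k from by omega]
        rw [List.zipIdx_cons, List.foldl_cons, hstep, hruns, List.foldl_cons]
        by_cases h1 : (1:Int) > mc
        · rw [if_pos h1, hrun 1 (i:Int) (by omega)]
          by_cases h2' : 1 + (k:Int) > 1
          · rw [if_pos h2', hrest (1 + (k:Int)) (i:Int) (by omega)]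
            congr 1
            simp only [maxUpd]
            rw [if_pos (by push_cast; omega)]
            simp [Prod.ext_iff]; omega
          · have hk0 : (k:Int) = 0 := by omega
            rw [if_neg h2', hrest 1 (i:Int) (by omega)]
            congr 1
            simp only [maxUpd]
            rw [if_pos (by push_cast; omega)]
            simp [Prod.ext_iff]; omega
        · rw [if_neg h1, hrun mc ms (by omega)]
          by_cases h2' : 1 + (k:Int) > mc
          · rw [if_pos h2', hrest (1 + (k:Int)) (i:Int) (by omega)]
            congr 1
            simp only [maxUpd]
            rw [if_pos (by push_cast; omega)]
            simp [Prod.ext_iff]; omega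
          · rw [if_neg h2', hrest mc ms (by omega)]
            congr 1
            simp only [maxUpd]
            rw [if_neg (by push_cast; omega)]
      · have hstep : maiStep (mc, ms, cc, cs) (x, i) = (mc, ms, 0, -1) := by
          simp [maiStep, hx]
        have hruns : runsOf (x :: xs) i = runsOf xs (i + 1) := by
          rw [runsOf, if_neg hx]
        rw [List.zipIdx_cons, List.foldl_cons, hstep, hruns]
        exact ih xs (by simp at hl; omega) (i+1) mc ms 0 (-1) (by omega) (by omega)
          (fun _ => rfl)

-- an empty run table means there is no 1 in the list
theorem runsOf_nil_no_one (n : Nat) : ∀ (l : List Int), l.length ≤ n → ∀ i, runsOf l i = [] → ∀ v ∈ l, v ≠ 1 := by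
  induction n with
  | zero =>
    intro l hl
    rw [List.length_eq_zero_iff.mp (Nat.le_zero.mp hl)]; simp
  | succ n ih =>
    intro l hl i hr v hv
    match l with
    | [] => simp at hv
    | x :: xs =>
      by_cases hx : x = 1
      · rw [runsOf, if_pos hx] at hr; simp at hr
      · rw [runsOf, if_neg hx] at hr
        rcases List.mem_cons.mp hv with h | h
        · simpa [h] using hx
        · exact ih xs (by simp at hl; omega) (i+1) hr v h

-- every run table is empty or starts with a run of positive length
theorem runsOf_cases (l : List Int) (i : Nat) :
    runsOf l i = [] ∨ ∃ s k rest, runsOf l i = (s, k + 1) :: rest := by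
  induction l generalizing i with
  | nil => left; simp [runsOf]
  | cons x xs ih =>
    by_cases hx : x = 1
    · right; exact ⟨i, countLead xs, _, by rw [runsOf, if_pos hx]⟩
    · rw [runsOf, if_neg hx]; exact ih (i + 1)

-- A's maxUpd fold over a run table equals B's first-longest selection (seed pair swapped)
theorem fold_maxUpd_eq_best (rs : List (Nat × Nat)) : ∀ (b : Nat × Nat),
    List.foldl maxUpd (((b.2 : Int)), ((b.1 : Int))) rs
      = ((((List.foldl (fun b q => if q.2 > b.2 then q else b) b rs).2 : Int)),
         (((List.foldl (fun b q => if q.2 > b.2 then q else b) b rs).1 : Int))) := by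
  induction rs with
  | nil => intro b; rfl
  | cons r rs ih =>
    intro b
    simp only [List.foldl_cons]
    by_cases h : r.2 > b.2
    · rw [show maxUpd ((b.2 : Int), (b.1 : Int)) r = ((r.2 : Int), (r.1 : Int)) by
        simp only [maxUpd]; rw [if_pos (by omega)], if_pos h]
      exact ih r
    · rw [show maxUpd ((b.2 : Int), (b.1 : Int)) r = ((b.2 : Int), (b.1 : Int)) by
        simp only [maxUpd]; rw [if_neg (by omega)], if_neg h]
      exact ih b

-- the inhibit map is the identity on a list holding no 1 (any window parameters)
theorem map_id_no_one (f : Int × Nat → Int) (hf : ∀ p : Int × Nat, p.1 ≠ 1 → f p = p.1) :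
    ∀ (l : List Int) (i : Nat), (∀ v ∈ l, v ≠ 1) → (l.zipIdx i).map f = l := by
  intro l
  induction l with
  | nil => simp
  | cons x xs ih =>
    intro i h
    rw [List.zipIdx_cons, List.map_cons, hf _ (h x (by simp)),
      ih (i+1) (fun v hv => h v (by simp [hv]))]

-- ===== VERDICT (by name: the statement is the Claim_ definition above) =====
theorem max_activate_inhibit_spec : Claim_equal_max_activate_inhibit := by
  intro arr _
  unfold Spec_max_activate_inhibit
  match harr : arr with
  | [] => simp [max_activate_inhibit, max_activate_inhibit_alt, runsOf]
  | y :: ys =>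
    have hmain := mainScan (y :: ys).length (y :: ys) le_rfl 0 0 (-1) 0 (-1)
      (by omega) (by omega) (fun _ => rfl)
    rcases runsOf_cases (y :: ys) 0 with hr | ⟨s, k, rest, hr⟩
    · simp only [max_activate_inhibit, max_activate_inhibit_alt, hr, if_neg
        (by simp : ¬ (y :: ys) = ([] : List Int))]
      exact map_id_no_one _ (fun p hp => by simp [hp]) (y :: ys) 0
        (runsOf_nil_no_one (y :: ys).length (y :: ys) le_rfl 0 hr)
    · rw [hr, List.foldl_cons,
        show maxUpd ((0:Int), (-1:Int)) (s, k + 1) = ((((k+1 : Nat) : Int)), ((s : Int))) by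
          simp only [maxUpd]; rw [if_pos (by push_cast; omega)],
        fold_maxUpd_eq_best rest (s, k + 1)] at hmain
      simp only [max_activate_inhibit, max_activate_inhibit_alt, hr, if_neg
        (by simp : ¬ (y :: ys) = ([] : List Int))]
      have hm1 := congrArg Prod.fst hmain
      have hm2 := congrArg Prod.snd hmain
      simp only at hm1 hm2
      apply List.map_congr_left
      intro p _
      rw [hm1, hm2]
      by_cases hv : p.1 = 1
      · simp only [hv, true_and]
        split <;> split <;> first | rfl | (exfalso; omega)
      · simp [hv]
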